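-- pv_equiv track=rewrite | github.com/huangwb8/ChineseResearchLaTeX | skills/nsfc-ref-alignment/scripts/runtime_utils.py | sanitize_lines_for_parsing
-- ===== SOURCE A (Python) =====
-- from typing import Any, Dict, List, Optional, Tuple
--
-- def strip_latex_comment(line: str) -> str:
--     """
--     Remove unescaped '%' comments from a LaTeX line while keeping content before it.
--     """
--     for i, ch in enumerate(line):
--         if ch != "%":
--             continue
--         bs = 0
--         j = i - 1
--         while j >= 0 and line[j] == "\\":
--             bs += 1
--             j -= 1
--         if bs % 2 == 1:
--             continue
--         return line[:i].rstrip()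
--     return line.rstrip("\n")
--
-- def sanitize_lines_for_parsing(lines: List[str]) -> List[str]:
--     """
--     Preprocess lines for command extraction:
--     - strip comments
--     - blank out verbatim-like environments (keep line count stable)
--     """
--     out: List[str] = []
--     in_verbatim = False
--     for line in lines:
--         stripped = line.strip()
--         if not in_verbatim and (
--             r"\begin{verbatim}" in stripped
--             or r"\begin{lstlisting}" in stripped
--             or r"\begin{minted}" in stripped
--         ):
--             in_verbatim = True
--             out.append("")
--             continue
--         if in_verbatim and (
--             r"\end{verbatim}" in stripped
--             or r"\end{lstlisting}" in stripped
--             or r"\end{minted}" in stripped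
--         ):
--             in_verbatim = False
--             out.append("")
--             continue
--         if in_verbatim:
--             out.append("")
--             continue
--         out.append(strip_latex_comment(line))
--     return out
-- ===== SOURCE B (Python) =====
-- from typing import List
--
-- _BEGINS = (r"\begin{verbatim}", r"\begin{lstlisting}", r"\begin{minted}")
-- _ENDS = (r"\end{verbatim}", r"\end{lstlisting}", r"\end{minted}")
--
-- def strip_latex_comment(line: str) -> str:
--     """Single forward scan carrying the parity of the run of preceding backslashes."""
--     bs = 0
--     for i, ch in enumerate(line):
--         if ch == "\\":
--             bs += 1
--         elif ch == "%":
--             if bs % 2 == 0: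
--                 return line[:i].rstrip()
--             bs = 0
--         else:
--             bs = 0
--     return line.rstrip("\n")
--
-- def sanitize_lines_for_parsing(lines: List[str]) -> List[str]:
--     out: List[str] = []
--     in_verbatim = False
--     for line in lines:
--         stripped = line.strip()
--         if in_verbatim:
--             in_verbatim = not any(e in stripped for e in _ENDS)
--             out.append("")
--         elif any(b in stripped for b in _BEGINS):
--             in_verbatim = True
--             out.append("")
--         else:
--             out.append(strip_latex_comment(line))
--     return out
-- ===== Notes on version B (the rewrite author's own statement) =====
-- stated objective: alternative
-- what changed: strip_latex_comment becomes a single forward scan carrying a running count of consecutive preceding backslashes (no backward rescan at each '%'), and the verbatim state machine is re-decomposed around an in_verbatim-first branch with any() over pattern tuples.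
import Mathlib
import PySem

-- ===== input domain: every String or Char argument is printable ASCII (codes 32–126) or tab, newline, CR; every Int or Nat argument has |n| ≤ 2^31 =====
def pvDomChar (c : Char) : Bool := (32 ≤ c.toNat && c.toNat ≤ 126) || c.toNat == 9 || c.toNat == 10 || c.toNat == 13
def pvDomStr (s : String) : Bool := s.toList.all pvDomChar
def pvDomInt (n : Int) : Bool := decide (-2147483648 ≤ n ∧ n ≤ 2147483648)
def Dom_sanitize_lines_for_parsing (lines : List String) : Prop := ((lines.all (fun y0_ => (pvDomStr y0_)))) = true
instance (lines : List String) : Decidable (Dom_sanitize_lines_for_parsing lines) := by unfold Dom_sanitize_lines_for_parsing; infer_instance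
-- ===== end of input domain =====

-- B replaces A's per-'%' backward backslash rescan by one forward scan carrying escape parity (alternative decomposition; same results).

-- ===== PORT A =====
-- rstrip("\n"): drop trailing newline characters (exact: rstrip with a one-char set).
def pvRstripNL (cs : List Char) : List Char := (cs.reverse.dropWhile (fun c => c == '\n')).reverse

-- the inner `while j >= 0 and line[j] == '\\'` loop of A, counting the run of backslashes just before index i
-- (A only calls it with i ≤ len, so getD's default is never read out of range in a way Python's line[j] would not be)
def pvBsBack (line : List Char) : Nat → Nat
  | 0 => 0
  | i + 1 => if line.getD i ' ' == '\\' then pvBsBack line i + 1 else 0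

-- A's `for i, ch in enumerate(line)` loop
def pvStripA_loop (line : List Char) : List Char → Nat → List Char
  | [], _ => pvRstripNL line
  | ch :: rest, i =>
    if ch == '%' then
      if pvBsBack line i % 2 == 1 then pvStripA_loop line rest (i + 1)
      else PySem.Chars.rstrip (line.take i)
    else pvStripA_loop line rest (i + 1)

def pvStripLatexComment (line : String) : String := String.ofList (pvStripA_loop line.toList line.toList 0)

def pvIsVerbBegin (stripped : String) : Bool :=
  PySem.Str.isIn "\\begin{verbatim}" stripped || PySem.Str.isIn "\\begin{lstlisting}" stripped ||
    PySem.Str.isIn "\\begin{minted}" stripped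

def pvIsVerbEnd (stripped : String) : Bool :=
  PySem.Str.isIn "\\end{verbatim}" stripped || PySem.Str.isIn "\\end{lstlisting}" stripped ||
    PySem.Str.isIn "\\end{minted}" stripped

def pvSanitizeA_loop : List String → Bool → List String
  | [], _ => []
  | line :: rest, inVerbatim =>
    let stripped := PySem.Str.strip line
    if !inVerbatim && pvIsVerbBegin stripped then "" :: pvSanitizeA_loop rest true
    else if inVerbatim && pvIsVerbEnd stripped then "" :: pvSanitizeA_loop rest false
    else if inVerbatim then "" :: pvSanitizeA_loop rest true
    else pvStripLatexComment line :: pvSanitizeA_loop rest inVerbatim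

def sanitize_lines_for_parsing (lines : List String) : List String := pvSanitizeA_loop lines false

-- ===== PORT B =====
def pvBegins : List String := ["\\begin{verbatim}", "\\begin{lstlisting}", "\\begin{minted}"]
def pvEnds : List String := ["\\end{verbatim}", "\\end{lstlisting}", "\\end{minted}"]

-- B's single forward scan: bs = length of the run of backslashes immediately before position i
def pvStripB_loop (line : List Char) : List Char → Nat → Nat → List Char
  | [], _, _ => (line.reverse.dropWhile (fun c => c == '\n')).reverse  -- line.rstrip("\n")
  | ch :: rest, i, bs =>
    if ch == '\\' then pvStripB_loop line rest (i + 1) (bs + 1)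
    else if ch == '%' then
      if bs % 2 == 0 then PySem.Chars.rstrip (line.take i)
      else pvStripB_loop line rest (i + 1) 0
    else pvStripB_loop line rest (i + 1) 0

def pvStripLatexCommentB (line : String) : String := String.ofList (pvStripB_loop line.toList line.toList 0 0)

def pvSanitizeB_loop : List String → Bool → List String
  | [], _ => []
  | line :: rest, inVerbatim =>
    let stripped := PySem.Str.strip line
    if inVerbatim then
      "" :: pvSanitizeB_loop rest (!(pvEnds.any (fun e => PySem.Str.isIn e stripped)))
    else if pvBegins.any (fun b => PySem.Str.isIn b stripped) then
      "" :: pvSanitizeB_loop rest true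
    else pvStripLatexCommentB line :: pvSanitizeB_loop rest inVerbatim

def sanitize_lines_for_parsing_alt (lines : List String) : List String := pvSanitizeB_loop lines false

-- ===== PRECONDITION & SPEC =====
def Spec_sanitize_lines_for_parsing (lines : List String) (out : List String) : Prop := out = sanitize_lines_for_parsing_alt lines
instance (lines : List String) (out : List String) : Decidable (Spec_sanitize_lines_for_parsing lines out) := by unfold Spec_sanitize_lines_for_parsing; infer_instance

-- ===== CLAIM (what is proved, stated in full; the proofs are below) =====
def Claim_equal_sanitize_lines_for_parsing : Prop := ∀ (lines : List String), Dom_sanitize_lines_for_parsing lines → Spec_sanitize_lines_for_parsing lines (sanitize_lines_for_parsing lines)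

-- ===== LEMMAS AND PROOFS =====

-- B's carried bs equals A's recomputed backslash run whenever the suffix at i is what remains to scan
lemma pvStrip_loop_eq (line : List Char) :
    ∀ (cs : List Char) (i : Nat), line.drop i = cs →
      pvStripA_loop line cs i = pvStripB_loop line cs i (pvBsBack line i) := by
  intro cs
  induction cs with
  | nil => intro i _; simp [pvStripA_loop, pvStripB_loop, pvRstripNL]
  | cons ch rest ih =>
    intro i h
    have h0 : getElem? line i = some ch := by
      have := congrArg (fun l => l[0]?) h; simpa using this
    have hi : line.getD i ' ' = ch := by simp [List.getD, h0]
    have hdrop : line.drop (i + 1) = rest := by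
      have h1 : (List.drop i line).drop 1 = rest := by rw [h]; rfl
      simpa [List.drop_drop] using h1
    have ih' := ih (i + 1) hdrop
    simp only [pvStripA_loop, pvStripB_loop]
    by_cases hc : ch = '\\'
    · have hbs : pvBsBack line (i + 1) = pvBsBack line i + 1 := by
        simp [pvBsBack, List.getD, h0, hc]
      rw [hbs] at ih'
      subst hc
      simp [ih']
    · have hbs : pvBsBack line (i + 1) = 0 := by
        simp [pvBsBack, List.getD, h0, hc]
      rw [hbs] at ih'
      by_cases hp : ch = '%'
      · subst hp
        simp only [show ('%' == '\\') = false from rfl, show ('%' == '%') = true from rfl,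
          if_true, Bool.false_eq_true, if_false]
        rcases Nat.even_or_odd (pvBsBack line i) with he | ho
        · have h2 : pvBsBack line i % 2 = 0 := Nat.even_iff.mp he
          simp [h2]
        · have h2 : pvBsBack line i % 2 = 1 := Nat.odd_iff.mp ho
          simp [h2, ih']
      · simp [hc, hp, ih']

lemma pvStrip_eq (line : String) : pvStripLatexComment line = pvStripLatexCommentB line := by
  unfold pvStripLatexComment pvStripLatexCommentB
  rw [pvStrip_loop_eq line.toList line.toList 0 (by simp), pvBsBack]

lemma pvAnyEnds (s : String) : pvEnds.any (fun e => PySem.Str.isIn e s) = pvIsVerbEnd s := by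
  simp [pvEnds, pvIsVerbEnd, Bool.or_assoc]

lemma pvAnyBegins (s : String) : pvBegins.any (fun b => PySem.Str.isIn b s) = pvIsVerbBegin s := by
  simp [pvBegins, pvIsVerbBegin, Bool.or_assoc]

lemma pvSanitize_loop_eq : ∀ (lines : List String) (inv : Bool),
    pvSanitizeA_loop lines inv = pvSanitizeB_loop lines inv := by
  intro lines
  induction lines with
  | nil => intro inv; rfl
  | cons line rest ih =>
    intro inv
    simp only [pvSanitizeA_loop, pvSanitizeB_loop, pvAnyEnds, pvAnyBegins]
    cases inv with
    | false => by_cases hb : pvIsVerbBegin (PySem.Str.strip line) <;> simp [hb, ih, pvStrip_eq]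
    | true => by_cases he : pvIsVerbEnd (PySem.Str.strip line) <;> simp [he, ih]

-- ===== VERDICT (by name: the statement is the Claim_ definition above) =====
theorem sanitize_lines_for_parsing_spec : Claim_equal_sanitize_lines_for_parsing := by
  intro lines _
  unfold Spec_sanitize_lines_for_parsing sanitize_lines_for_parsing sanitize_lines_for_parsing_alt
  exact pvSanitize_loop_eq lines false
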